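-- pv_equiv track=rewrite | github.com/Alan-G-S-Oliveira/BeeCrowd | Strings/1284 - Digitando no Telefone Celular.py | verifica
-- ===== SOURCE A (Python) =====
-- def verifica(dicionario: list, palavra: str, original: str) -> int:
--     tamanho = len(palavra)
--     cont = 0
--     conjunto = set()
--     for i in dicionario:
--         if i.startswith(palavra):
--             if len(i) == tamanho:
--                 if palavra != original:
--                     cont += 1
--             else:
--                 conjunto.add(i[tamanho])
--     return len(conjunto) + cont
-- ===== SOURCE B (Python) =====
-- def verifica(dicionario: list, palavra: str, original: str) -> int:
--     t = len(palavra)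
--     exatas = 0 if palavra == original else dicionario.count(palavra)
--     proximos = sorted(w[t] for w in dicionario if len(w) > t and w.startswith(palavra))
--     distintos = 0
--     prev = None
--     for c in proximos:
--         if c != prev:
--             distintos += 1
--             prev = c
--     return distintos + exatas
-- ===== Notes on version B (the rewrite author's own statement) =====
-- stated objective: alternative
-- what changed: Instead of one loop maintaining a hash set of next characters and an exact-match counter, B counts exact matches with list.count and counts distinct next characters by sorting the collected branch characters and counting value changes in a single scan (no set).
import Mathlib
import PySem

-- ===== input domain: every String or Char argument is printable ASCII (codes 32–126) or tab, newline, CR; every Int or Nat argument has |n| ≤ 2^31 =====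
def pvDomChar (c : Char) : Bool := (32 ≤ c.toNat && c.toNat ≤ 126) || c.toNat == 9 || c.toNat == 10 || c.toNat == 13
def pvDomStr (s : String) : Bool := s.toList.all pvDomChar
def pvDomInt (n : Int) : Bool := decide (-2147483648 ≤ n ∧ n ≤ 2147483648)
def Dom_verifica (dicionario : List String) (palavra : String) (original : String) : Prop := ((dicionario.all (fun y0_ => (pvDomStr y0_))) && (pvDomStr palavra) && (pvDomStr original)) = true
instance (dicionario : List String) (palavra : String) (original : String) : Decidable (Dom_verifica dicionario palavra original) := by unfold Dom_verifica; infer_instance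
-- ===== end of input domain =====

-- B counts the distinct branch characters by sorting them and counting value changes in one
-- scan (no set), and counts exact matches with list.count — an alternative decomposition,
-- not claimed faster.

-- ===== PORT A =====
-- literal port of A: one pass over the dictionary, maintaining a set of next characters and a
-- counter of exact matches.  i[tamanho] is ported with pyGetD: in the branch where it is
-- evaluated, startswith and len(i) ≠ tamanho guarantee the index is in range (exact there),
-- so the default is never used.
def verifica (dicionario : List String) (palavra : String) (original : String) : Int :=
  let tamanho := PySem.Str.len palavra
  let res := dicionario.foldl (fun (st : PySem.Set Char × Int) i =>
    if PySem.Str.startswith i palavra then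
      if PySem.Str.len i = tamanho then
        if palavra ≠ original then (st.1, st.2 + 1) else st
      else
        (st.1.add (PySem.List.pyGetD i.toList tamanho ' '), st.2)
    else st) (PySem.Set.empty, 0)
  (PySem.Set.len res.1) + res.2

-- ===== PORT B =====
-- port of B: exact matches via list.count, branch characters collected, sorted, and their
-- distinct count obtained by counting value changes in one scan over the sorted list.
-- w[t] is ported with pyGetD: the filter guarantees t < len(w), so the index is in range.
def verifica_alt (dicionario : List String) (palavra : String) (original : String) : Int :=
  let t := PySem.Str.len palavra
  let exatas : Int := if palavra = original then 0 else PySem.List.count dicionario palavra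
  let proximos := PySem.List.sorted
    ((dicionario.filter (fun w => decide (t < PySem.Str.len w) && PySem.Str.startswith w palavra)).map
      (fun w => PySem.List.pyGetD w.toList t ' ')) (fun c => c) false
  let r := proximos.foldl (fun (st : Int × Option Char) c =>
    if st.2 = some c then st else (st.1 + 1, some c)) (0, none)
  r.1 + exatas

-- ===== PRECONDITION & SPEC =====
def Spec_verifica (dicionario : List String) (palavra : String) (original : String) (out : Int) : Prop := out = verifica_alt dicionario palavra original
instance (dicionario : List String) (palavra : String) (original : String) (out : Int) : Decidable (Spec_verifica dicionario palavra original out) := by unfold Spec_verifica; infer_instance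

-- ===== CLAIM (what is proved, stated in full; the proofs are below) =====
def Claim_equal_verifica : Prop := ∀ (dicionario : List String) (palavra : String) (original : String), Dom_verifica dicionario palavra original → Spec_verifica dicionario palavra original (verifica dicionario palavra original)

-- ===== LEMMAS AND PROOFS =====

-- the list of "next characters" both programs collect (B's filter+map, written out)
def pvNexts (d : List String) (p : String) : List Char :=
  (d.filter (fun w => decide (PySem.Str.len p < PySem.Str.len w) && PySem.Str.startswith w p)).map
    (fun w => PySem.List.pyGetD w.toList (PySem.Str.len p) ' ')

lemma pv_startswith_iff (w p : String) :
    PySem.Str.startswith w p = true ↔ p.toList <+: w.toList := by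
  simp [PySem.Chars.startswith_iff]

lemma pv_eq_of_startswith_len (w p : String)
    (h : PySem.Str.startswith w p = true) (hl : PySem.Str.len w = PySem.Str.len p) :
    w = p := by
  rw [pv_startswith_iff] at h
  simp only [PySem.Str.len_eq] at hl
  have hlen : w.toList.length = p.toList.length := by
    have := String.length_toList (s := w); have := String.length_toList (s := p); omega
  exact String.toList_inj.mp (List.IsPrefix.eq_of_length h hlen.symm).symm

lemma pv_len_lt_of_startswith_ne (w p : String)
    (h : PySem.Str.startswith w p = true) (hne : ¬ PySem.Str.len w = PySem.Str.len p) :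
    PySem.Str.len p < PySem.Str.len w := by
  rw [pv_startswith_iff] at h
  have := h.length_le
  simp only [PySem.Str.len_eq] at *
  have := String.length_toList (s := w); have := String.length_toList (s := p); omega

-- A's loop computes: the fold of Set.add over pvNexts, and the count of exact matches
lemma pv_afold (d : List String) (p o : String) (s : PySem.Set Char) (c : Int) :
    d.foldl (fun (st : PySem.Set Char × Int) i =>
      if PySem.Str.startswith i p then
        if PySem.Str.len i = PySem.Str.len p then
          if p ≠ o then (st.1, st.2 + 1) else st
        else
          (st.1.add (PySem.List.pyGetD i.toList (PySem.Str.len p) ' '), st.2)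
      else st) (s, c)
    = ((pvNexts d p).foldl PySem.Set.add s,
       c + (if p = o then 0 else (PySem.List.count d p : Int))) := by
  induction d generalizing s c with
  | nil => simp [pvNexts]
  | cons w d ih =>
    simp only [List.foldl_cons]
    by_cases hs : PySem.Str.startswith w p = true
    · by_cases hl : PySem.Str.len w = PySem.Str.len p
      · have hwp : w = p := pv_eq_of_startswith_len w p hs hl
        have hfilt : pvNexts (w :: d) p = pvNexts d p := by
          simp [pvNexts, hwp]
        have hcnt : PySem.List.count (w :: d) p = PySem.List.count d p + 1 := by
          simp [PySem.List.count, hwp]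
        by_cases ho : p = o
        · rw [if_pos hs, if_pos hl, if_neg (by simp [ho]), ih, hfilt]
          simp [ho]
        · rw [if_pos hs, if_pos hl, if_pos ho, ih, hfilt, hcnt]
          rw [if_neg ho, if_neg ho]
          refine Prod.ext rfl ?_
          push_cast
          ring
      · have hlt := pv_len_lt_of_startswith_ne w p hs hl
        have hwp : w ≠ p := fun h => hl (by rw [h])
        have hs' : PySem.Chars.startswith w.toList p.toList = true := by simpa using hs
        have hlt' : p.length < w.length := by
          simp only [PySem.Str.len_eq] at hlt; exact_mod_cast hlt
        have hfilt : pvNexts (w :: d) p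
            = PySem.List.pyGetD w.toList (PySem.Str.len p) ' ' :: pvNexts d p := by
          simp [pvNexts, hs', hlt']
        have hcnt : PySem.List.count (w :: d) p = PySem.List.count d p := by
          simp [PySem.List.count, hwp]
        rw [if_pos hs, if_neg hl, ih, hfilt, hcnt]
        rfl
    · have hwp : w ≠ p := by
        intro h; subst h
        exact hs (by rw [pv_startswith_iff])
      have hs' : PySem.Chars.startswith w.toList p.toList = false := by
        simpa using hs
      have hfilt : pvNexts (w :: d) p = pvNexts d p := by
        simp [pvNexts, hs']
      have hcnt : PySem.List.count (w :: d) p = PySem.List.count d p := by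
        simp [PySem.List.count, hwp]
      rw [if_neg hs, ih, hfilt, hcnt]

-- number of value changes in a list whose previous value is `c`
def pvTrans (c : Char) : List Char → Nat
  | [] => 0
  | b :: l => if b = c then pvTrans c l else 1 + pvTrans b l

lemma pv_bfold (l : List Char) (k : Int) (c : Char) :
    (l.foldl (fun (st : Int × Option Char) x =>
      if st.2 = some x then st else (st.1 + 1, some x)) (k, some c)).1
    = k + pvTrans c l := by
  induction l generalizing k c with
  | nil => simp [pvTrans]
  | cons b l ih =>
    simp only [List.foldl_cons, pvTrans]
    by_cases hb : b = c
    · subst hb; simp [ih]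
    · rw [if_neg (by simp [Ne.symm hb]), if_neg hb, ih]
      push_cast
      ring

-- on a weakly increasing list, the number of value changes is the number of distinct values
lemma pv_trans_card (c : Char) (l : List Char) (h : (c :: l).Pairwise (· ≤ ·)) :
    1 + pvTrans c l = (c :: l).toFinset.card := by
  induction l generalizing c with
  | nil => simp [pvTrans]
  | cons b l ih =>
    rw [List.pairwise_cons] at h
    obtain ⟨hc, hb⟩ := h
    by_cases hbc : b = c
    · subst hbc
      have : pvTrans b (b :: l) = pvTrans b l := by simp [pvTrans]
      rw [this, ih b hb]
      simp
    · have hlt : c < b := lt_of_le_of_ne (hc b (by simp)) (Ne.symm hbc)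
      have hcl : c ∉ b :: l := by
        intro hmem
        rcases List.mem_cons.mp hmem with h1 | h2
        · exact hbc (h1.symm)
        · obtain ⟨hb1, -⟩ := List.pairwise_cons.mp hb
          exact absurd (hb1 c h2) (not_le.mpr hlt)
      have : pvTrans c (b :: l) = 1 + pvTrans b l := by simp [pvTrans, hbc]
      rw [this]
      have hcard : ((c :: b :: l).toFinset).card = (b :: l).toFinset.card + 1 := by
        rw [List.toFinset_cons, Finset.card_insert_of_notMem (by simpa using hcl)]
      rw [hcard, ← ih b hb]
      ring

-- A's set size is the number of distinct collected characters
lemma pv_setlen (l : List Char) :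
    PySem.Set.len (l.foldl PySem.Set.add PySem.Set.empty) = (l.toFinset.card : Int) := by
  have hof : l.foldl PySem.Set.add PySem.Set.empty = PySem.Set.ofList l :=
    (PySem.Set.ofList_eq_foldl l).symm
  rw [hof]
  have hnd : (PySem.Set.ofList l).Nodup := PySem.Set.nodup_ofList l
  have hfs : (PySem.Set.ofList l).toFinset = l.toFinset := by
    ext x; simp [PySem.Set.mem_ofList]
  have := List.toFinset_card_of_nodup hnd
  unfold PySem.Set.len
  rw [← this, hfs]

-- B's change-counting scan over the sorted list also yields the number of distinct characters
lemma pv_bside (l : List Char) :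
    ((PySem.List.sorted l (fun c => c) false).foldl (fun (st : Int × Option Char) c =>
      if st.2 = some c then st else (st.1 + 1, some c)) (0, none)).1
    = (l.toFinset.card : Int) := by
  have hperm : (PySem.List.sorted l (fun c => c) false).Perm l :=
    PySem.List.sorted_perm l (fun c => c) false
  have hpw : (PySem.List.sorted l (fun c => c) false).Pairwise (· ≤ ·) := by
    simpa using PySem.List.sorted_pairwise l (fun c => c)
  rcases hm : PySem.List.sorted l (fun c => c) false with _ | ⟨c, t⟩
  · rw [hm] at hperm
    have : l.toFinset = ∅ := by
      ext x; simp [← hperm.mem_iff]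
    simp [this]
  · rw [hm] at hperm hpw
    have hfs : l.toFinset = (c :: t).toFinset := by
      ext x; simp [← hperm.mem_iff]
    rw [List.foldl_cons]
    rw [if_neg (by simp)]
    show (List.foldl (fun (st : Int × Option Char) c =>
      if st.2 = some c then st else (st.1 + 1, some c)) (0 + 1, some c) t).1 = (l.toFinset.card : Int)
    rw [pv_bfold t (0 + 1) c]
    rw [hfs, ← pv_trans_card c t hpw]
    push_cast
    ring

-- ===== VERDICT (by name: the statement is the Claim_ definition above) =====
theorem verifica_spec : Claim_equal_verifica := by
  intro d p o _
  unfold Spec_verifica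
  simp only [verifica, verifica_alt]
  rw [pv_afold d p o PySem.Set.empty 0]
  rw [pv_setlen (pvNexts d p)]
  rw [show ((d.filter (fun w => decide (PySem.Str.len p < PySem.Str.len w) && PySem.Str.startswith w p)).map
      (fun w => PySem.List.pyGetD w.toList (PySem.Str.len p) ' ')) = pvNexts d p from rfl]
  rw [pv_bside (pvNexts d p)]
  ring
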